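-- pv_equiv track=rewrite | github.com/stumburs/pizza-son | bot/markov/markov.py | split_words_with_spaces
-- ===== SOURCE A (Python) =====
-- def split_words_with_spaces(text: str) -> list[str]:
--     """
--     Splits text into words while keeping trailing spaces with the words.
--     Example: "hello world" -> ["hello ", "world"]
--     """
--     chunks = []
--     current_chunk = ""
--
--     for char in text:
--         current_chunk += char
--         if (
--             char.isspace() and current_chunk.strip()
--         ):  # If we hit a space and have non-space chars
--             chunks.append(current_chunk)
--             current_chunk = ""
--
--     # Add the last chunk if it's not empty
--     if current_chunk:
--         chunks.append(current_chunk)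
--
--     return chunks
-- ===== SOURCE B (Python) =====
-- def split_words_with_spaces(text: str) -> list[str]:
--     """
--     Splits text into words while keeping trailing spaces with the words.
--     Run-based rewrite: scan maximal runs of space/non-space characters;
--     leading spaces are held pending, a word run takes the first following
--     space as its trailing space.
--     """
--     chunks = []
--     pending = ""   # accumulated whitespace not yet attached to a word
--     n = len(text)
--     i = 0
--     while i < n:
--         is_sp = text[i].isspace()
--         j = i + 1
--         while j < n and text[j].isspace() == is_sp:
--             j += 1
--         run = text[i:j]
--         if is_sp:
--             pending += run
--         else:
--             if j < n:  # a whitespace char follows: it closes the chunk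
--                 chunks.append(pending + run + text[j])
--                 pending = ""
--                 j += 1
--             else:
--                 chunks.append(pending + run)
--                 pending = ""
--         i = j
--     if pending:
--         chunks.append(pending)
--     return chunks
-- ===== Notes on version B (the rewrite author's own statement) =====
-- stated objective: alternative
-- what changed: A builds each chunk one character at a time with a string accumulator and flushes on a whitespace char; B scans maximal whitespace/non-whitespace runs with slicing, holding leading spaces pending and closing a word's chunk with the single whitespace character that follows it.
import Mathlib
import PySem

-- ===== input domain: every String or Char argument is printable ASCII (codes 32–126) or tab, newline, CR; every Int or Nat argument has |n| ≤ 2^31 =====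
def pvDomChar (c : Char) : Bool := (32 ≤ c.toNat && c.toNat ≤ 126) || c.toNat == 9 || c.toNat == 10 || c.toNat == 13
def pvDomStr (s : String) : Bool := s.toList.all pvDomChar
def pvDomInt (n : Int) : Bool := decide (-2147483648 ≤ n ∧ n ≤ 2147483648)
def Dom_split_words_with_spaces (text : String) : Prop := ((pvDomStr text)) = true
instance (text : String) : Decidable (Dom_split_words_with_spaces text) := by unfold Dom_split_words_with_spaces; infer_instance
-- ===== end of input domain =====

-- B rewrites A's per-character accumulator loop as a scan over maximal whitespace /
-- non-whitespace runs (objective: alternative decomposition, same cost).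

-- ===== PORT A =====
-- A's loop: state = (chunks so far, current_chunk); one step per character.
def pvGoA (chunks : List String) (cc : List Char) : List Char → List String
  | [] => if cc ≠ [] then chunks ++ [String.ofList cc] else chunks
  | c :: rest =>
    let cc' := cc ++ [c]
    if PySem.Chars.isspace c = true ∧ PySem.Chars.strip cc' ≠ [] then
      pvGoA (chunks ++ [String.ofList cc']) [] rest
    else
      pvGoA chunks cc' rest

def split_words_with_spaces (text : String) : List String :=
  pvGoA [] [] text.toList

-- ===== PORT B =====
-- B's while-loop over runs: state = (chunks, pending spaces); each step consumes a
-- whole run (plus, after a word run, the one whitespace character that closes it).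
def pvGoB (chunks : List String) (pending : List Char) : List Char → List String
  | [] => if pending ≠ [] then chunks ++ [String.ofList pending] else chunks
  | c :: rest =>
    if PySem.Chars.isspace c then
      pvGoB chunks (pending ++ (c :: rest.takeWhile PySem.Chars.isspace))
        (rest.dropWhile PySem.Chars.isspace)
    else
      let run := c :: rest.takeWhile (fun x => !PySem.Chars.isspace x)
      let rest2 := rest.dropWhile (fun x => !PySem.Chars.isspace x)
      if h : rest2 = [] then
        chunks ++ [String.ofList (pending ++ run)]
      else
        pvGoB (chunks ++ [String.ofList (pending ++ run ++ [rest2.head h])]) [] rest2.tail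
termination_by l => l.length
decreasing_by
  · have := List.length_dropWhile_le PySem.Chars.isspace rest
    simp; omega
  · have h1 := List.length_dropWhile_le (fun x => !PySem.Chars.isspace x) rest
    have h2 : (List.dropWhile (fun x => !PySem.Chars.isspace x) rest).tail.length ≤
        (List.dropWhile (fun x => !PySem.Chars.isspace x) rest).length := by
      cases List.dropWhile (fun x => !PySem.Chars.isspace x) rest <;> simp
    simp only [List.length_cons]
    omega

def split_words_with_spaces_alt (text : String) : List String :=
  pvGoB [] [] text.toList

-- ===== PRECONDITION & SPEC =====
def Spec_split_words_with_spaces (text : String) (out : List String) : Prop := out = split_words_with_spaces_alt text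
instance (text : String) (out : List String) : Decidable (Spec_split_words_with_spaces text out) := by unfold Spec_split_words_with_spaces; infer_instance

-- ===== CLAIM (what is proved, stated in full; the proofs are below) =====
def Claim_equal_split_words_with_spaces : Prop := ∀ (text : String), Dom_split_words_with_spaces text → Spec_split_words_with_spaces text (split_words_with_spaces text)

-- ===== LEMMAS AND PROOFS =====

-- A chunk's `.strip()` is empty exactly when it is all whitespace.
lemma pv_strip_eq_nil_iff (cs : List Char) :
    PySem.Chars.strip cs = [] ↔ ∀ c ∈ cs, PySem.Chars.isspace c = true := by
  simp only [PySem.Chars.strip, PySem.Chars.rstrip, PySem.Chars.lstrip,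
    List.reverse_eq_nil_iff, List.dropWhile_eq_nil_iff, List.mem_reverse]
  constructor
  · intro h c hc
    rcases List.mem_append.mp
      ((List.takeWhile_append_dropWhile (p := PySem.Chars.isspace) (l := cs)) ▸ hc) with h1 | h1
    · exact List.mem_takeWhile_imp h1
    · exact h c h1
  · intro h c hc
    exact h c (List.Sublist.mem hc (List.dropWhile_sublist _))

-- A's loop absorbs a run of whitespace into an all-whitespace current chunk.
lemma pvGoA_spaces (s : List Char) (hs : ∀ c ∈ s, PySem.Chars.isspace c = true) :
    ∀ (p : List Char), (∀ c ∈ p, PySem.Chars.isspace c = true) →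
    ∀ (chunks : List String) (l : List Char),
      pvGoA chunks p (s ++ l) = pvGoA chunks (p ++ s) l := by
  induction s with
  | nil => intro p _ chunks l; simp
  | cons c s' ih =>
    intro p hp chunks l
    have hc : PySem.Chars.isspace c = true := hs c (by simp)
    have hall : ∀ x ∈ p ++ [c], PySem.Chars.isspace x = true := by
      intro x hx
      rcases List.mem_append.mp hx with h | h
      · exact hp x h
      · simp at h; subst h; exact hc
    have hstrip : PySem.Chars.strip (p ++ [c]) = [] := (pv_strip_eq_nil_iff _).mpr hall
    show pvGoA chunks p (c :: (s' ++ l)) = _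
    rw [pvGoA]
    simp only [hstrip, ne_eq, not_true_eq_false, and_false, if_false]
    rw [ih (fun x hx => hs x (by simp [hx])) (p ++ [c]) hall chunks l]
    simp

-- A's loop absorbs a run of non-whitespace characters into the current chunk.
lemma pvGoA_word (w : List Char) (hw : ∀ c ∈ w, PySem.Chars.isspace c = false) :
    ∀ (p : List Char) (chunks : List String) (l : List Char),
      pvGoA chunks p (w ++ l) = pvGoA chunks (p ++ w) l := by
  induction w with
  | nil => intro p chunks l; simp
  | cons c w' ih =>
    intro p chunks l
    have hc : PySem.Chars.isspace c = false := hw c (by simp)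
    show pvGoA chunks p (c :: (w' ++ l)) = _
    rw [pvGoA]
    simp only [hc, false_and, if_false, Bool.false_eq_true]
    rw [ih (fun x hx => hw x (by simp [hx])) (p ++ [c]) chunks l]
    simp

-- Main invariant: with an all-whitespace pending chunk the two loops agree.
lemma pvGoA_eq_pvGoB :
    ∀ (n : Nat) (l : List Char), l.length ≤ n →
    ∀ (p : List Char), (∀ c ∈ p, PySem.Chars.isspace c = true) →
    ∀ (chunks : List String), pvGoA chunks p l = pvGoB chunks p l := by
  intro n
  induction n with
  | zero =>
    intro l hl p _ chunks
    have : l = [] := List.eq_nil_of_length_eq_zero (Nat.le_zero.mp hl)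
    subst this
    rw [pvGoA, pvGoB]
  | succ n ih =>
    intro l hl p hp chunks
    cases l with
    | nil => rw [pvGoA, pvGoB]
    | cons c rest =>
      by_cases hc : PySem.Chars.isspace c = true
      · -- whitespace run
        have hdecomp : c :: rest =
            (c :: rest.takeWhile PySem.Chars.isspace) ++ rest.dropWhile PySem.Chars.isspace := by
          simp [List.takeWhile_append_dropWhile]
        have hs : ∀ x ∈ c :: rest.takeWhile PySem.Chars.isspace,
            PySem.Chars.isspace x = true := by
          intro x hx
          rcases List.mem_cons.mp hx with h | h
          · subst h; exact hc
          · exact List.mem_takeWhile_imp h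
        have hall : ∀ x ∈ p ++ (c :: rest.takeWhile PySem.Chars.isspace),
            PySem.Chars.isspace x = true := by
          intro x hx
          rcases List.mem_append.mp hx with h | h
          · exact hp x h
          · exact hs x h
        rw [hdecomp, pvGoA_spaces _ hs p hp chunks _]
        have hlen : (rest.dropWhile PySem.Chars.isspace).length ≤ n := by
          have := List.length_dropWhile_le PySem.Chars.isspace rest
          simp at hl; omega
        rw [ih _ hlen _ hall chunks]
        conv_rhs => rw [pvGoB.eq_def]
        simp [hc]
      · -- word run
        have hc' : PySem.Chars.isspace c = false := by simpa using hc
        have hw : ∀ x ∈ c :: rest.takeWhile (fun x => !PySem.Chars.isspace x),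
            PySem.Chars.isspace x = false := by
          intro x hx
          rcases List.mem_cons.mp hx with h | h
          · subst h; exact hc'
          · simpa using List.mem_takeWhile_imp h
        have hdecomp : c :: rest =
            (c :: rest.takeWhile (fun x => !PySem.Chars.isspace x)) ++
              rest.dropWhile (fun x => !PySem.Chars.isspace x) := by
          simp [List.takeWhile_append_dropWhile]
        conv_lhs => rw [hdecomp]
        rw [pvGoA_word _ hw p chunks _]
        conv_rhs => rw [pvGoB.eq_def]
        simp only [hc', Bool.false_eq_true, if_false]
        cases hr : rest.dropWhile (fun x => !PySem.Chars.isspace x) with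
        | nil =>
          rw [pvGoA]
          simp
        | cons s rest' =>
          -- s is whitespace: it is the head of dropWhile (¬ isspace)
          have hsp : PySem.Chars.isspace s = true := by
            have := List.head?_dropWhile_not (fun x => !PySem.Chars.isspace x) rest
            rw [hr] at this; simpa using this
          have hstrip : PySem.Chars.strip
              ((p ++ (c :: rest.takeWhile (fun x => !PySem.Chars.isspace x))) ++ [s]) ≠ [] := by
            intro hcon
            have := (pv_strip_eq_nil_iff _).mp hcon c (by simp)
            rw [hc'] at this; exact Bool.false_ne_true this
          rw [pvGoA]
          simp only [hsp, hstrip, ne_eq, not_false_eq_true, and_self, if_true]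
          have hlen : rest'.length ≤ n := by
            have h1 := List.length_dropWhile_le (fun x => !PySem.Chars.isspace x) rest
            rw [hr] at h1
            simp at hl h1; omega
          rw [ih _ hlen [] (by simp) _]
          simp

-- ===== VERDICT (by name: the statement is the Claim_ definition above) =====
theorem split_words_with_spaces_spec : Claim_equal_split_words_with_spaces := by
  intro text _
  unfold Spec_split_words_with_spaces split_words_with_spaces split_words_with_spaces_alt
  exact pvGoA_eq_pvGoB text.toList.length text.toList le_rfl [] (by simp) []
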